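-- pv_equiv track=rewrite | github.com/thaReal/MasterChef | codeforces/ed_round_86/period.py | solve
-- ===== SOURCE A (Python) =====
-- def solve(t):
-- 	lmax = len(t) * 2
-- 	sol = ''
--
-- 	if t.find('0') == -1:
-- 		period = '1'
--
-- 	elif t.find('1') == -1:
-- 		period = '0'
--
-- 	elif t.find('01') == -1:
-- 		period = '10'
--
-- 	else:
-- 		period = '01'
--
-- 	lp = len(period)
-- 	if lp == 1:
-- 		return len(t) * period
--
-- 	i = 0
-- 	for j in range(len(t)):
-- 		idx = i % 2
-- 		val = period[idx]
-- 		if val != t[j]: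
-- 			sol += val
-- 			i += 1
-- 		sol += t[j]
-- 		i += 1
--
-- 	return sol
-- ===== SOURCE B (Python) =====
-- def solve(t):
--     if '0' not in t:
--         return len(t) * '1'
--     if '1' not in t:
--         return len(t) * '0'
--     e = '1' if '01' not in t else '0'
--     parts = []
--     n = len(t)
--     j = 0
--     while j < n:
--         c = t[j]
--         k = j + 1
--         while k < n and t[k] == c:
--             k += 1
--         L = k - j
--         if c == e:
--             o = '1' if c == '0' else '0'
--             parts.append(c + (o + c) * (L - 1))
--             e = o
--         else:
--             parts.append((e + c) * L)
--         j = k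
--     return ''.join(parts)
-- ===== Notes on version B (the rewrite author's own statement) =====
-- stated objective: alternative
-- what changed: Replaces the per-character greedy loop with its i%2 counter and single-char appends by a run-based build: scan maximal runs of equal characters and emit each run's whole contribution (c + (opp+c)*(L-1) or (e+c)*L) in one step, joining the pieces at the end; the period selection stays, the lp==1 case becomes two direct early returns.
import Mathlib
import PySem

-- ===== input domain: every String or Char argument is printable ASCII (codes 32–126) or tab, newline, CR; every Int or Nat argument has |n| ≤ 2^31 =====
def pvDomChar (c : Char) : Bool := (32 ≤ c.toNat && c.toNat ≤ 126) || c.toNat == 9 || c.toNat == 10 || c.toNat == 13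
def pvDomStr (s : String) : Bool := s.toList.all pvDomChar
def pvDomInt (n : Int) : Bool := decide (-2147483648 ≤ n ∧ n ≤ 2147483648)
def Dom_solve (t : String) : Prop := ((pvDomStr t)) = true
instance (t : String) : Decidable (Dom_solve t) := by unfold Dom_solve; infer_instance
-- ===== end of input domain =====

-- B replaces A's per-character loop (i%2 counter, single-char appends) by a run-based build; same output, same cost (objective: alternative).

-- ===== PORT A =====
-- the for-loop over range(len(t)): state (sol, i); period[i % 2] is always in range here (period has length 2), hence getD
def solveLoopA (period : List Char) (sol : List Char) (i : Int) (cs : List Char) : List Char :=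
  match cs with
  | [] => sol
  | c :: rest =>
    let idx := PySem.Int.mod i 2
    let val := (PySem.List.pyGet? period idx).getD ' '
    if val ≠ c then solveLoopA period (sol ++ [val, c]) (i + 2) rest
    else solveLoopA period (sol ++ [c]) (i + 1) rest

def solve (t : String) : String :=
  if PySem.Str.find t "0" = -1 then
    String.mk (PySem.List.pyRepeat "1".toList (PySem.Str.len t))
  else if PySem.Str.find t "1" = -1 then
    String.mk (PySem.List.pyRepeat "0".toList (PySem.Str.len t))
  else
    let period : List Char := if PySem.Str.find t "01" = -1 then ['1', '0'] else ['0', '1']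
    String.mk (solveLoopA period [] 0 t.toList)

-- ===== PORT B =====
-- the while-loop over maximal runs: one recursive step consumes a whole run of equal characters
def runsB (e : Char) (cs : List Char) : List Char :=
  match cs with
  | [] => []
  | c :: rest =>
    let run := rest.takeWhile (fun d => d == c)
    let rest' := rest.dropWhile (fun d => d == c)
    if c = e then
      let o : Char := if c = '0' then '1' else '0'
      (c :: (List.replicate run.length [o, c]).flatten) ++ runsB o rest'
    else
      (List.replicate (run.length + 1) [e, c]).flatten ++ runsB e rest'
termination_by cs.length
decreasing_by
  all_goals
    simp only [List.length_cons]
    exact Nat.lt_succ_of_le (List.length_dropWhile_le _ _)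

def solve_alt (t : String) : String :=
  if PySem.Str.isIn "0" t = false then
    String.mk (PySem.List.pyRepeat "1".toList (PySem.Str.len t))
  else if PySem.Str.isIn "1" t = false then
    String.mk (PySem.List.pyRepeat "0".toList (PySem.Str.len t))
  else
    let e : Char := if PySem.Str.isIn "01" t = false then '1' else '0'
    String.mk (runsB e t.toList)

-- ===== PRECONDITION & SPEC =====
def Spec_solve (t : String) (out : String) : Prop := out = solve_alt t
instance (t : String) (out : String) : Decidable (Spec_solve t out) := by unfold Spec_solve; infer_instance

-- ===== CLAIM (what is proved, stated in full; the proofs are below) =====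
def Claim_equal_solve : Prop := ∀ (t : String), Dom_solve t → Spec_solve t (solve t)

-- ===== LEMMAS AND PROOFS =====

/-- A's loop with the `i % 2` counter abstracted away: `e0` is the currently expected
character, `e1` the one expected after a match. -/
def loopT (e0 e1 : Char) (cs sol : List Char) : List Char :=
  match cs with
  | [] => sol
  | c :: rest => if e0 ≠ c then loopT e0 e1 rest (sol ++ [e0, c]) else loopT e1 e0 rest (sol ++ [c])

def flipC (c : Char) : Char := if c = '0' then '1' else '0'

theorem solveLoopA_eq_loopT (p0 p1 : Char) (cs : List Char) :
    ∀ (i : Int) (sol : List Char),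
      solveLoopA [p0, p1] sol i cs
        = loopT (if i % 2 = 0 then p0 else p1) (if (i + 1) % 2 = 0 then p0 else p1) cs sol := by
  induction cs with
  | nil => intro i sol; rfl
  | cons c rest ih =>
    intro i sol
    have hmod : PySem.Int.mod i 2 = i % 2 := PySem.Int.mod_eq_emod_of_pos (by norm_num)
    have h01 : i % 2 = 0 ∨ i % 2 = 1 := by omega
    have hval : (PySem.List.pyGet? [p0, p1] (PySem.Int.mod i 2)).getD ' '
        = (if i % 2 = 0 then p0 else p1) := by
      rw [hmod]
      rcases h01 with h | h <;> rw [h] <;> simp [PySem.List.pyGet?, PySem.List.pyIdx?]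
    show (if ((PySem.List.pyGet? [p0, p1] (PySem.Int.mod i 2)).getD ' ') ≠ c then
            solveLoopA [p0, p1] (sol ++ [(PySem.List.pyGet? [p0, p1] (PySem.Int.mod i 2)).getD ' ', c]) (i + 2) rest
          else solveLoopA [p0, p1] (sol ++ [c]) (i + 1) rest) = _
    rw [hval, ih (i + 2), ih (i + 1)]
    have h2 : (i + 2) % 2 = i % 2 := by omega
    have h3 : (i + 2 + 1) % 2 = (i + 1) % 2 := by omega
    have h4 : (i + 1 + 1) % 2 = i % 2 := by omega
    rw [h2, h3, h4]
    conv_rhs => rw [loopT]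

theorem takeWhile_dropWhile_nil (p : Char → Bool) (l : List Char) :
    List.takeWhile p (List.dropWhile p l) = [] := by
  induction l with
  | nil => rfl
  | cons a t ih =>
    by_cases h : p a
    · simpa [h] using ih
    · simp [h]

theorem runsB_skip (e c : Char) (hne : ¬ c = e) :
    ∀ (m : Nat) (rest' : List Char), rest'.takeWhile (fun d => d == c) = [] →
      runsB e (List.replicate m c ++ rest')
        = (List.replicate m [e, c]).flatten ++ runsB e rest' := by
  intro m rest' htw
  cases m with
  | zero => simp
  | succ m' =>
    have hdw : rest'.dropWhile (fun d => d == c) = rest' := by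
      conv_rhs => rw [← List.takeWhile_append_dropWhile (p := fun d => d == c) (l := rest')]
      rw [htw]; rfl
    have hall : ∀ x ∈ List.replicate m' c, (fun d => d == c) x := by simp
    show runsB e (c :: (List.replicate m' c ++ rest')) = _
    conv_lhs => rw [runsB]
    simp only [List.takeWhile_append_of_pos hall, List.dropWhile_append_of_pos hall,
      ]
    simp [htw, hdw, hne, List.replicate_succ]

theorem runsB_cons (e c : Char) (rest : List Char) (he : e = '0' ∨ e = '1') :
    runsB e (c :: rest)
      = if e ≠ c then e :: c :: runsB e rest else c :: runsB (flipC e) rest := by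
  have hsplit := List.takeWhile_append_dropWhile (p := fun d => d == c) (l := rest)
  set run := rest.takeWhile (fun d => d == c) with hrun
  set rest' := rest.dropWhile (fun d => d == c) with hrest'
  have hrep : run = List.replicate run.length c := by
    apply List.eq_replicate_of_mem
    intro b hb
    have := List.mem_takeWhile_imp hb
    simpa using this
  have htw' : rest'.takeWhile (fun d => d == c) = [] := by
    rw [hrest']; exact takeWhile_dropWhile_nil _ rest
  by_cases hec : e = c
  · -- first char matches the expected one; the rest of the run is consumed with the flipped state
    have hco : ¬ c = flipC e := by
      rw [← hec] at *
      rcases he with h | h <;> subst h <;> simp [flipC]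
    have hfe : (if c = '0' then '1' else '0') = flipC e := by rw [← hec]; rfl
    have hrw : runsB (flipC e) rest = (List.replicate run.length [flipC e, c]).flatten ++ runsB (flipC e) rest' := by
      conv_lhs => rw [← hsplit, hrep]
      rw [runsB_skip (flipC e) c hco run.length rest' htw']
    have hne' : ¬ (e ≠ c) := by simp [hec]
    rw [if_neg hne']
    conv_lhs => rw [runsB]
    simp only [← hrun, ← hrest', if_pos hec.symm, hfe]
    rw [hrw, List.cons_append]
  · -- the whole run mismatches
    have hcn : ¬ c = e := fun h => hec h.symm
    have hrw : runsB e rest = (List.replicate run.length [e, c]).flatten ++ runsB e rest' := by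
      conv_lhs => rw [← hsplit, hrep]
      rw [runsB_skip e c hcn run.length rest' htw']
    rw [if_pos hec]
    conv_lhs => rw [runsB]
    simp only [← hrun, ← hrest', if_neg hcn]
    rw [hrw]
    simp [List.replicate_succ]

theorem loopT_eq_runsB (cs : List Char) :
    ∀ (e : Char) (sol : List Char), (e = '0' ∨ e = '1') →
      loopT e (flipC e) cs sol = sol ++ runsB e cs := by
  induction cs with
  | nil => intro e sol _; simp [loopT, runsB]
  | cons c rest ih =>
    intro e sol he
    have hff : flipC (flipC e) = e := by rcases he with h | h <;> subst h <;> rfl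
    have hfb : flipC e = '0' ∨ flipC e = '1' := by rcases he with h | h <;> subst h <;> simp [flipC]
    rw [runsB_cons e c rest he]
    unfold loopT
    by_cases hec : e ≠ c
    · rw [if_pos hec, if_pos hec, ih e _ he]; simp
    · rw [if_neg hec, if_neg hec]
      have h1 : loopT (flipC e) e rest (sol ++ [c]) = loopT (flipC e) (flipC (flipC e)) rest (sol ++ [c]) := by
        rw [hff]
      rw [h1, ih (flipC e) _ hfb]; simp

theorem find_eq_isIn_false (t : String) (sub : String) :
    (PySem.Str.find t sub = -1) ↔ (PySem.Str.isIn sub t = false) := by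
  rw [PySem.Str.find_eq, PySem.Str.isIn_eq, PySem.Chars.find_eq_neg_one_iff,
    PySem.Chars.isIn_eq_false_iff]

-- ===== VERDICT (by name: the statement is the Claim_ definition above) =====
theorem solve_spec : Claim_equal_solve := by
  unfold Claim_equal_solve
  intro t _
  unfold Spec_solve solve solve_alt
  by_cases h0 : PySem.Str.find t "0" = -1
  · rw [if_pos h0, if_pos ((find_eq_isIn_false t "0").mp h0)]
  · rw [if_neg h0, if_neg (fun hb => h0 ((find_eq_isIn_false t "0").mpr hb))]
    by_cases h1 : PySem.Str.find t "1" = -1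
    · rw [if_pos h1, if_pos ((find_eq_isIn_false t "1").mp h1)]
    · rw [if_neg h1, if_neg (fun hb => h1 ((find_eq_isIn_false t "1").mpr hb))]
      by_cases h01 : PySem.Str.find t "01" = -1
      · rw [if_pos h01, if_pos ((find_eq_isIn_false t "01").mp h01)]
        show String.mk (solveLoopA ['1', '0'] [] 0 t.toList) = String.mk (runsB '1' t.toList)
        rw [solveLoopA_eq_loopT '1' '0' t.toList 0 []]
        norm_num
        have : loopT '1' '0' t.toList [] = loopT '1' (flipC '1') t.toList [] := rfl
        rw [this, loopT_eq_runsB t.toList '1' [] (Or.inr rfl)]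
        rfl
      · rw [if_neg h01, if_neg (fun hb => h01 ((find_eq_isIn_false t "01").mpr hb))]
        show String.mk (solveLoopA ['0', '1'] [] 0 t.toList) = String.mk (runsB '0' t.toList)
        rw [solveLoopA_eq_loopT '0' '1' t.toList 0 []]
        norm_num
        have : loopT '0' '1' t.toList [] = loopT '0' (flipC '0') t.toList [] := rfl
        rw [this, loopT_eq_runsB t.toList '0' [] (Or.inl rfl)]
        rfl
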